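-- pv_equiv track=rewrite | github.com/luffykesh/leetcode | 290.py | morph
-- ===== SOURCE A (Python) =====
-- def morph(itr):
--     mp = {}
--     l = []
--     for i in range(len(itr)):
--         if itr[i] not in mp:
--             mp[itr[i]] = i
--         l.append(mp[itr[i]])
--     return tuple(l)
-- ===== SOURCE B (Python) =====
-- def morph(itr):
--     # Build the answer back to front.  Invariant: after processing the last k
--     # elements, res is the first-occurrence pattern of that suffix and suf is
--     # the suffix itself.  Prepending x: x itself maps to 0; every later element
--     # maps to 0 if it equals x, otherwise its previous first index shifted by 1.
--     res = []
--     suf = []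
--     for x in reversed(list(itr)):
--         res = [0] + [0 if y == x else j + 1 for y, j in zip(suf, res)]
--         suf = [x] + suf
--     return tuple(res)
-- ===== Notes on version B (the rewrite author's own statement) =====
-- stated objective: alternative
-- what changed: B builds the pattern back-to-front with no dict and no index scans: it folds over the reversed list, prepending each element and rewriting the suffix's pattern by the recurrence 'equal to the new head -> 0, otherwise previous first index + 1'.
import Mathlib
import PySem

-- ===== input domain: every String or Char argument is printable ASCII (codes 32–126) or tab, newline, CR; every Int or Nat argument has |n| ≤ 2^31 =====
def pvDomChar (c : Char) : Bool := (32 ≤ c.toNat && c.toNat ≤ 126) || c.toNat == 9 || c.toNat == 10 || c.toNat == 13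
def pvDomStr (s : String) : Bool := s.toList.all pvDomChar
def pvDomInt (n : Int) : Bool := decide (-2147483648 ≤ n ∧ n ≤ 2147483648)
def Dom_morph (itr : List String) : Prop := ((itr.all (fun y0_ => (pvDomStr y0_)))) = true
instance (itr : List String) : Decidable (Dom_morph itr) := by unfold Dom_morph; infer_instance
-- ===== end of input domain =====

-- B replaces A's incremental first-seen dict by a back-to-front construction: a fold over
-- the reversed list that rewrites the suffix's pattern via 'equals new head -> 0, else +1';
-- objective: alternative (same values, genuinely different traversal).


-- ===== PORT A =====
-- literal port of A: fold over range(len(itr)) carrying (mp, l)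
def morph (itr : List String) : List Int :=
  (((PySem.List.pyRange 0 (itr.length : Int) 1).foldl
    (fun (st : PySem.Dict String Int × List Int) i =>
      let x := PySem.List.pyGetD itr i ""
      let mp := if st.1.contains x then st.1 else st.1.insert x i
      (mp, st.2 ++ [mp.getD x 0]))
    (PySem.Dict.empty, []))).2

-- ===== PORT B =====
-- literal port of B: fold over reversed(itr) carrying (res, suf);
-- res = [0] + [0 if y == x else j + 1 for y, j in zip(suf, res)], suf = [x] + suf
def morph_alt (itr : List String) : List Int :=
  (itr.reverse.foldl
    (fun (st : List Int × List String) x =>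
      ((0 : Int) :: (st.2.zip st.1).map (fun p => if p.1 == x then (0 : Int) else p.2 + 1),
       x :: st.2))
    ([], [])).1

-- ===== PRECONDITION & SPEC =====
def Spec_morph (itr : List String) (out : List Int) : Prop := out = morph_alt itr
instance (itr : List String) (out : List Int) : Decidable (Spec_morph itr out) := by unfold Spec_morph; infer_instance

-- ===== CLAIM (what is proved, stated in full; the proofs are below) =====
def Claim_equal_morph : Prop := ∀ (itr : List String), Dom_morph itr → Spec_morph itr (morph itr)

-- ===== LEMMAS AND PROOFS =====

-- the common specification: each element mapped to its first index
def firstIdx (l : List String) (y : String) : Int :=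
  (((PySem.List.index? l y).getD 0 : Nat) : Int)

-- ---- A side ----

-- A's loop body, as a step over an enumerated element
def morphStep (st : PySem.Dict String Int × List Int) (p : Int × String) :
    PySem.Dict String Int × List Int :=
  let mp := if st.1.contains p.2 then st.1 else st.1.insert p.2 p.1
  (mp, st.2 ++ [mp.getD p.2 0])

theorem morph_eq_enum (itr : List String) :
    morph itr = ((PySem.List.enumerate itr 0).foldl morphStep (PySem.Dict.empty, [])).2 := by
  rw [PySem.List.enumerate_eq_map_pyRange itr ""]
  rw [List.foldl_map]
  rfl

-- x ∉ pre → first index of x in pre ++ x :: t is pre.length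
theorem index?_middle (pre t : List String) (x : String) (hx : x ∉ pre) :
    PySem.List.index? (pre ++ x :: t) x = some pre.length := by
  rw [PySem.List.index?_eq_some_iff]
  exact ⟨pre, t, rfl, rfl, hx⟩

-- loop invariant: mp maps each string to its first index in the processed prefix
theorem morph_loop (full : List String) :
    ∀ (suf pre : List String) (mp : PySem.Dict String Int) (acc : List Int),
    full = pre ++ suf →
    (∀ x, mp.get? x = (PySem.List.index? pre x).map (fun k => (k : Int))) →
    ((PySem.List.enumerate suf (pre.length : Int)).foldl morphStep (mp, acc)).2
      = acc ++ suf.map (firstIdx full) := by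
  intro suf
  induction suf with
  | nil => intro pre mp acc _ _; simp [PySem.List.enumerate_nil]
  | cons x suf' ih =>
    intro pre mp acc hfull hinv
    rw [PySem.List.enumerate_cons]
    simp only [List.foldl_cons, List.map_cons]
    by_cases hmem : x ∈ pre
    · -- seen before: dict unchanged, value = first index in pre = first index in full
      have hsome : ∃ k, PySem.List.index? pre x = some k := by
        have := PySem.List.index?_isSome_iff (xs := pre) (v := x)
        rcases Option.isSome_iff_exists.mp (this.mpr hmem) with ⟨k, hk⟩
        exact ⟨k, hk⟩
      rcases hsome with ⟨k, hk⟩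
      have hc : mp.contains x = true := by
        have := PySem.Dict.get?_eq_none_iff_contains (d := mp) (k := x)
        by_contra hfalse
        have : mp.get? x = none := this.mpr (by simpa using hfalse)
        rw [hinv x, hk] at this; simp at this
      have hget : mp.getD x 0 = (k : Int) := by
        apply PySem.Dict.getD_of_get?_eq_some
        rw [hinv x, hk]; rfl
      have hfullidx : PySem.List.index? full x = some k := by
        rw [hfull, PySem.List.index?_append_of_mem _ hmem, hk]
      have hstep : morphStep (mp, acc) ((pre.length : Int), x)
          = (mp, acc ++ [(k : Int)]) := by
        simp [morphStep, hc, hget]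
      rw [hstep]
      have hinv' : ∀ y, mp.get? y
          = (PySem.List.index? (pre ++ [x]) y).map (fun k => (k : Int)) := by
        intro y
        by_cases hy : y ∈ pre
        · rw [hinv y, PySem.List.index?_append_of_mem _ hy]
        · by_cases hyx : y = x
          · subst hyx; exact absurd hmem hy
          · have h1 : PySem.List.index? pre y = none :=
              (PySem.List.index?_eq_none_iff _ _).mpr hy
            have h2 : PySem.List.index? (pre ++ [x]) y = none := by
              rw [PySem.List.index?_eq_none_iff _ _]
              simp [hy, hyx]
            rw [hinv y, h1, h2]
      have := ih (pre ++ [x]) mp (acc ++ [(k : Int)])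
        (by rw [hfull]; simp) hinv'
      simp only [List.length_append, List.length_cons, List.length_nil] at this
      rw [show ((pre.length : Int) + 1) = ((pre.length + 1 : Nat) : Int) by push_cast; ring] at *
      simp only [show pre.length + 0 + 1 = pre.length + 1 from by omega] at this
      have hfi : firstIdx full x = (k : Int) := by
        simp only [firstIdx]; rw [hfullidx]; rfl
      rw [this, hfi]
      simp
    · -- new element: inserted at current index = its first index in full
      have hc : mp.contains x = false := by
        have hnone : mp.get? x = none := by
          rw [hinv x, (PySem.List.index?_eq_none_iff _ _).mpr hmem]; rfl
        have := PySem.Dict.get?_eq_none_iff_contains (d := mp) (k := x)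
        simpa using this.mp hnone
      have hfullidx : PySem.List.index? full x = some pre.length := by
        rw [hfull]; exact index?_middle pre suf' x hmem
      have hstep : morphStep (mp, acc) ((pre.length : Int), x)
          = (mp.insert x (pre.length : Int), acc ++ [(pre.length : Int)]) := by
        simp [morphStep, hc, PySem.Dict.getD_insert_self]
      rw [hstep]
      have hinv' : ∀ y, (mp.insert x (pre.length : Int)).get? y
          = (PySem.List.index? (pre ++ [x]) y).map (fun k => (k : Int)) := by
        intro y
        by_cases hyx : y = x
        · subst hyx
          rw [PySem.Dict.get?_insert_self,
            PySem.List.index?_append_singleton_self _ _ hmem]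
          rfl
        · rw [PySem.Dict.get?_insert]; rw [if_neg hyx]
          by_cases hy : y ∈ pre
          · rw [hinv y, PySem.List.index?_append_of_mem _ hy]
          · have h1 : PySem.List.index? pre y = none :=
              (PySem.List.index?_eq_none_iff _ _).mpr hy
            have h2 : PySem.List.index? (pre ++ [x]) y = none := by
              rw [PySem.List.index?_eq_none_iff _ _]
              simp [hy, hyx]
            rw [hinv y, h1, h2]
      have := ih (pre ++ [x]) (mp.insert x (pre.length : Int))
        (acc ++ [(pre.length : Int)]) (by rw [hfull]; simp) hinv'
      simp only [List.length_append, List.length_cons, List.length_nil] at this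
      rw [show ((pre.length : Int) + 1) = ((pre.length + 1 : Nat) : Int) by push_cast; ring] at *
      simp only [show pre.length + 0 + 1 = pre.length + 1 from by omega] at this
      have hfi : firstIdx full x = ((pre.length : Nat) : Int) := by
        simp only [firstIdx]; rw [hfullidx]; rfl
      rw [this, hfi]
      simp

theorem morph_eq_firstIdx (itr : List String) : morph itr = itr.map (firstIdx itr) := by
  rw [morph_eq_enum]
  have := morph_loop itr itr [] PySem.Dict.empty []
    (by simp) (by intro x; simp [PySem.Dict.get?_empty, PySem.List.index?_eq_idxOf?])
  simpa using this

-- ---- B side ----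

-- B's loop body
def altStep (st : List Int × List String) (x : String) : List Int × List String :=
  ((0 : Int) :: (st.2.zip st.1).map (fun p => if p.1 == x then (0 : Int) else p.2 + 1),
   x :: st.2)

-- prepending x shifts the first-occurrence pattern
theorem firstIdx_cons (x : String) (l : List String) (y : String) (hy : y ∈ l) :
    firstIdx (x :: l) y = if y == x then (0 : Int) else firstIdx l y + 1 := by
  by_cases hyx : y = x
  · subst hyx
    simp only [firstIdx, beq_self_eq_true, if_true]
    rw [PySem.List.index?_cons_self]
    rfl
  · have hne : x ≠ y := fun h => hyx h.symm
    rcases Option.isSome_iff_exists.mp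
      ((PySem.List.index?_isSome_iff (xs := l) (v := y)).mpr hy) with ⟨k, hk⟩
    simp only [firstIdx]
    rw [PySem.List.index?_cons_of_ne _ hne, hk]
    simp [hyx]

-- mapping over a list zipped with a map of itself
theorem zip_self_map {α β γ : Type} (f : α → β) (g : α × β → γ) :
    ∀ l : List α, (l.zip (l.map f)).map g = l.map (fun y => g (y, f y))
  | [] => rfl
  | x :: l => by simp [zip_self_map f g l]

-- fold invariant: after processing the reversed suffix, the state is (pattern of suffix, suffix)
theorem alt_loop (l : List String) :
    l.reverse.foldl altStep ([], []) = (l.map (firstIdx l), l) := by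
  induction l with
  | nil => simp
  | cons x l ih =>
    rw [List.reverse_cons, List.foldl_append, ih]
    simp only [List.foldl_cons, List.foldl_nil, altStep, Prod.mk.injEq]
    refine ⟨?_, trivial⟩
    rw [List.map_cons, zip_self_map]
    congr 1
    · show (0 : Int) = firstIdx (x :: l) x
      simp only [firstIdx]
      rw [PySem.List.index?_cons_self]
      rfl
    · apply List.map_congr_left
      intro y hy
      rw [firstIdx_cons x l y hy]

-- ===== VERDICT (by name: the statement is the Claim_ definition above) =====
theorem morph_spec : Claim_equal_morph := by
  intro itr _
  show morph itr = (itr.reverse.foldl altStep ([], [])).1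
  rw [morph_eq_firstIdx, alt_loop]
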